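-- pv_equiv track=rewrite | github.com/yasufumi-nakata/Pytra | src/toolchain/ir/core_text_semantics.py | _sh_is_identifier
-- ===== SOURCE A (Python) =====
-- def _sh_is_identifier(text: str) -> bool:
--     """ASCII 識別子（先頭英字/`_`）かを返す。"""
--     if text == "":
--         return False
--     c0 = text[0:1]
--     is_head = ("A" <= c0 <= "Z") or ("a" <= c0 <= "z") or c0 == "_"
--     if not is_head:
--         return False
--     for ch in text[1:]:
--         is_body = ("A" <= ch <= "Z") or ("a" <= ch <= "z") or ("0" <= ch <= "9") or ch == "_"
--         if not is_body:
--             return False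
--     return True
-- ===== SOURCE B (Python) =====
-- import re
--
-- _SH_IDENT_RE = re.compile(r"[A-Za-z_][A-Za-z0-9_]*")
--
--
-- def _sh_is_identifier(text: str) -> bool:
--     """ASCII 識別子（先頭英字/`_`）かを返す。"""
--     return _SH_IDENT_RE.fullmatch(text) is not None
-- ===== Notes on version B (the rewrite author's own statement) =====
-- stated objective: idiomatic
-- what changed: Replaces the hand-written head check and early-return tail loop with an anchored regex fullmatch against the explicit ASCII classes [A-Za-z_][A-Za-z0-9_]*; the Lean port runs this regex as its two-state DFA folded over the string.
import Mathlib
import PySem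

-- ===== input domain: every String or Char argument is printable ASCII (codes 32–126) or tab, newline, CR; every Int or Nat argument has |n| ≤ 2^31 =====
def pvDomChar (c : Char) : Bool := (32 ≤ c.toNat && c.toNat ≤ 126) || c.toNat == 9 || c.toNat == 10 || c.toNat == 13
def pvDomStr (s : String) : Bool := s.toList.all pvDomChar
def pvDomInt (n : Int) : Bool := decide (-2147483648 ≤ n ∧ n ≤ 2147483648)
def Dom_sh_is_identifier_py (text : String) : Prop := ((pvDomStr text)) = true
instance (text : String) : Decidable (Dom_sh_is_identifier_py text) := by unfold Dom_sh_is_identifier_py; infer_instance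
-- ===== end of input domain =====

-- B replaces A's hand-written head check + early-return tail loop by an anchored regex
-- fullmatch r"[A-Za-z_][A-Za-z0-9_]*" (objective: idiomatic); the port runs that regex
-- as its two-state DFA folded over the whole string.

-- ===== PORT A =====
-- the `for ch in text[1:]` loop with its early `return False`
def shALoop : List Char → Bool
  | [] => true
  | ch :: rest =>
      let is_body := (decide ('A' ≤ ch) && decide (ch ≤ 'Z')) ||
                     (decide ('a' ≤ ch) && decide (ch ≤ 'z')) ||
                     (decide ('0' ≤ ch) && decide (ch ≤ '9')) || (ch == '_')
      if !is_body then false else shALoop rest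

-- text[0:1] on the (nonempty) text is its first character; the 1-char-string
-- comparisons "A" <= c0 <= "Z" etc. are exactly the codepoint comparisons on that character.
def sh_is_identifier_py (text : String) : Bool :=
  if text = "" then false
  else
    match text.toList with
    | [] => false   -- unreachable: text ≠ ""
    | c0 :: _ =>
      let is_head := (decide ('A' ≤ c0) && decide (c0 ≤ 'Z')) ||
                     (decide ('a' ≤ c0) && decide (c0 ≤ 'z')) || (c0 == '_')
      if !is_head then false
      else shALoop (PySem.Chars.slice text.toList (some 1) none)

-- ===== PORT B =====
-- the regex's character classes: [A-Za-z_] and [A-Za-z0-9_]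
def shReHead (c : Char) : Bool :=
  (decide ('A' ≤ c) && decide (c ≤ 'Z')) || (decide ('a' ≤ c) && decide (c ≤ 'z')) || c == '_'

def shReBody (c : Char) : Bool :=
  (decide ('A' ≤ c) && decide (c ≤ 'Z')) || (decide ('a' ≤ c) && decide (c ≤ 'z')) ||
    (decide ('0' ≤ c) && decide (c ≤ '9')) || c == '_'

-- DFA of r"[A-Za-z_][A-Za-z0-9_]*": state 0 = start, 1 = accepting, 2 = dead
def shDfaStep (s : Nat) (c : Char) : Nat :=
  match s with
  | 0 => if shReHead c then 1 else 2
  | 1 => if shReBody c then 1 else 2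
  | _ => 2

-- fullmatch = run the DFA over the whole string and test acceptance
def sh_is_identifier_py_alt (text : String) : Bool :=
  text.toList.foldl shDfaStep 0 == 1

-- ===== PRECONDITION & SPEC =====
def Spec_sh_is_identifier_py (text : String) (out : Bool) : Prop := out = sh_is_identifier_py_alt text
instance (text : String) (out : Bool) : Decidable (Spec_sh_is_identifier_py text out) := by unfold Spec_sh_is_identifier_py; infer_instance

-- ===== CLAIM (what is proved, stated in full; the proofs are below) =====
def Claim_equal_sh_is_identifier_py : Prop := ∀ (text : String), Dom_sh_is_identifier_py text → Spec_sh_is_identifier_py text (sh_is_identifier_py text)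

-- ===== LEMMAS AND PROOFS =====

-- the dead state absorbs
theorem foldl_dead (l : List Char) : l.foldl shDfaStep 2 = 2 := by
  induction l with
  | nil => rfl
  | cons c rest ih => simpa [shDfaStep] using ih

-- from the accepting state, the DFA accepts iff A's tail loop accepts
theorem foldl_acc_eq_loop (l : List Char) :
    (l.foldl shDfaStep 1 == 1) = shALoop l := by
  induction l with
  | nil => rfl
  | cons c rest ih =>
    show (List.foldl shDfaStep (shDfaStep 1 c) rest == 1)
        = (if !(shReBody c) then false else shALoop rest)
    cases h : shReBody c
    · simp [shDfaStep, h, foldl_dead]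
    · simpa [shDfaStep, h] using ih

-- ===== VERDICT (by name: the statement is the Claim_ definition above) =====
theorem sh_is_identifier_py_spec : Claim_equal_sh_is_identifier_py := by
  intro text _
  show sh_is_identifier_py text = sh_is_identifier_py_alt text
  unfold sh_is_identifier_py sh_is_identifier_py_alt
  by_cases hne : text = ""
  · subst hne; rfl
  · simp only [hne, if_false]
    have hl : text.toList ≠ [] := by
      simpa [← String.toList_eq_nil_iff] using hne
    rcases hcons : text.toList with _ | ⟨c0, rest⟩
    · exact absurd hcons hl
    · show (if !(shReHead c0) then false
            else shALoop (PySem.Chars.slice (c0 :: rest) (some 1) none))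
          = (List.foldl shDfaStep (shDfaStep 0 c0) rest == 1)
      cases h : shReHead c0
      · simp [shDfaStep, h, foldl_dead]
      · simp [shDfaStep, h, foldl_acc_eq_loop,
          PySem.Chars.slice_eq_listSlice, PySem.List.slice_from_one]
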